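-- pv_equiv track=rewrite | github.com/kun0906/odet | odet/datasets/_base.py | parse_tcp_flgs
-- ===== SOURCE A (Python) =====
-- def parse_tcp_flgs(tcp_flgs):
-- 	# flags = {
-- 	#     'F': 'FIN',
-- 	#     'S': 'SYN',
-- 	#     'R': 'RST',
-- 	#     'P': 'PSH',
-- 	#     'A': 'ACK',
-- 	#     'U': 'URG',
-- 	#     'E': 'ECE',
-- 	#     'C': 'CWR',
-- 	# }
-- 	flgs = {
-- 		'F': 0,
-- 		'S': 0,
-- 		'R': 0,
-- 		'P': 0,
-- 		'A': 0,
-- 		'U': 0,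
-- 		'E': 0,
-- 		'C': 0,
-- 	}
-- 	# flags = sorted(flags.items(), key=lambda x:x[0], reverse=True)
-- 	# flags = OrderedDict(flags.items())
-- 	# flg_lst = [0]*len(flags)
-- 	# [flags[x] for x in p.sprintf('%TCP.flags%')]
-- 	# ['SYN', 'ACK']
-- 	for flg in tcp_flgs:
-- 		if flg in flgs.keys():
-- 			flgs[flg] += 1
--
-- 	return list(flgs.values())
-- ===== SOURCE B (Python) =====
-- def parse_tcp_flgs(tcp_flgs):
-- 	# Count each known flag directly with str.count, in the fixed key order,
-- 	# instead of maintaining a dict while scanning once.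
-- 	return [tcp_flgs.count(c) for c in 'FSRPAUEC']
-- ===== Notes on version B (the rewrite author's own statement) =====
-- stated objective: faster
-- what changed: Replaces the dict-of-counters scan with a membership guard by a comprehension calling str.count once per known flag in the fixed key order.
import Mathlib
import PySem

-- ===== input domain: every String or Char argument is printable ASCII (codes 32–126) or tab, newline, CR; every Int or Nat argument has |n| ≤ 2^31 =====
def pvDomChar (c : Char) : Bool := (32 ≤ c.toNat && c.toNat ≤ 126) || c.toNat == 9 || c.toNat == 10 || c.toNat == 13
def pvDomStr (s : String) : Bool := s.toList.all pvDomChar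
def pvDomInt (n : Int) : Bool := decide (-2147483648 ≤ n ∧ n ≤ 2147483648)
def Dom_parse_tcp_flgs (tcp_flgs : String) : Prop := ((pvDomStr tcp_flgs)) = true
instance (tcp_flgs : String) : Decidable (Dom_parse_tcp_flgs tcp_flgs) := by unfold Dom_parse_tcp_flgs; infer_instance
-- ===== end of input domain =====

-- B replaces A's guarded dict-counting scan by one str.count per flag in the fixed order 'FSRPAUEC' (idiomatic; same results).

-- ===== PORT A =====
-- 'if flg in flgs.keys(): flgs[flg] += 1' — the in-place += is Dict.modify (key is present when the branch runs)
def parse_tcp_flgs (tcp_flgs : String) : List Int :=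
  let flgs : PySem.Dict Char Int :=
    PySem.Dict.ofList [('F',0),('S',0),('R',0),('P',0),('A',0),('U',0),('E',0),('C',0)]
  let flgs := tcp_flgs.toList.foldl
    (fun d flg => if d.keys.contains flg then d.modify flg 0 (· + 1) else d) flgs
  flgs.values

-- ===== PORT B =====
def parse_tcp_flgs_alt (tcp_flgs : String) : List Int :=
  "FSRPAUEC".toList.map (fun c => ((PySem.Str.count tcp_flgs (String.ofList [c]) : Nat) : Int))

-- ===== PRECONDITION & SPEC =====
def Spec_parse_tcp_flgs (tcp_flgs : String) (out : List Int) : Prop := out = parse_tcp_flgs_alt tcp_flgs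
instance (tcp_flgs : String) (out : List Int) : Decidable (Spec_parse_tcp_flgs tcp_flgs out) := by unfold Spec_parse_tcp_flgs; infer_instance

-- ===== CLAIM (what is proved, stated in full; the proofs are below) =====
def Claim_equal_parse_tcp_flgs : Prop := ∀ (tcp_flgs : String), Dom_parse_tcp_flgs tcp_flgs → Spec_parse_tcp_flgs tcp_flgs (parse_tcp_flgs tcp_flgs)

-- ===== LEMMAS AND PROOFS =====

-- A's loop body, named so the lemmas can speak about it
def pvStepA (d : PySem.Dict Char Int) (flg : Char) : PySem.Dict Char Int :=
  if d.keys.contains flg then d.modify flg 0 (· + 1) else d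

-- the guarded loop never changes the key list
lemma keys_foldl_pvStepA : ∀ (l : List Char) (d : PySem.Dict Char Int),
    (l.foldl pvStepA d).keys = d.keys
  | [], d => rfl
  | x :: t, d => by
    rw [List.foldl_cons, keys_foldl_pvStepA t]
    by_cases hc : d.keys.contains x
    · have hcd : d.contains x := by
        simpa [PySem.Dict.contains_iff_mem_keys] using hc
      unfold pvStepA
      rw [if_pos hc, PySem.Dict.keys_modify, PySem.Dict.keys_insert_of_contains _ _ hcd]
    · unfold pvStepA; rw [if_neg hc]

-- counting invariant of A's loop at any key already present in the dict
lemma getD_foldl_pvStepA : ∀ (l : List Char) (d : PySem.Dict Char Int) (k : Char),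
    k ∈ d.keys → (l.foldl pvStepA d).getD k 0 = d.getD k 0 + l.count k
  | [], d, k, _ => by simp
  | x :: t, d, k, hk => by
    rw [List.foldl_cons]
    by_cases hc : d.keys.contains x
    · have hcd : d.contains x := by
        simpa [PySem.Dict.contains_iff_mem_keys] using hc
      have hkeys : (d.modify x 0 (· + 1)).keys = d.keys := by
        rw [PySem.Dict.keys_modify, PySem.Dict.keys_insert_of_contains _ _ hcd]
      rw [show pvStepA d x = d.modify x 0 (· + 1) by unfold pvStepA; rw [if_pos hc],
        getD_foldl_pvStepA t _ k (by rw [hkeys]; exact hk), PySem.Dict.getD_modify]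
      by_cases hkx : k = x
      · subst hkx; simp [List.count_cons]; ring
      · simp [List.count_cons, hkx, Ne.symm hkx]
    · have hne : k ≠ x := fun h => hc (List.contains_iff_mem.mpr (h ▸ hk))
      rw [show pvStepA d x = d by unfold pvStepA; rw [if_neg hc],
        getD_foldl_pvStepA t d k hk]
      simp [List.count_cons, Ne.symm hne]

-- str.count with a single-character needle is character count (unrolls the go loop of PySem.Chars.count)
lemma count_go_single (c : Char) : ∀ (fuel : Nat) (l : List Char) (acc : Nat), l.length ≤ fuel →
    PySem.Chars.count.go [c] fuel l acc = acc + l.count c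
  | 0, [], acc, _ => by simp [PySem.Chars.count.go]
  | 0, x :: t, acc, h => by simp at h
  | fuel+1, [], acc, _ => by simp [PySem.Chars.count.go]
  | fuel+1, x :: t, acc, h => by
    rw [PySem.Chars.count.go]
    by_cases hx : x = c
    · subst hx
      simp [List.isPrefixOf, count_go_single x fuel t (acc+1) (by simpa using h), List.count_cons]
      omega
    · simp [List.isPrefixOf, Ne.symm hx, hx, count_go_single c fuel t acc (by simpa using h)]

lemma count_single (l : List Char) (c : Char) : PySem.Chars.count l [c] = l.count c := by
  simp [PySem.Chars.count, count_go_single c l.length l 0 le_rfl]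

-- ===== VERDICT (by name: the statement is the Claim_ definition above) =====
theorem parse_tcp_flgs_spec : Claim_equal_parse_tcp_flgs := by
  intro s _
  unfold Spec_parse_tcp_flgs parse_tcp_flgs parse_tcp_flgs_alt
  set d0 : PySem.Dict Char Int :=
    PySem.Dict.ofList [('F',0),('S',0),('R',0),('P',0),('A',0),('U',0),('E',0),('C',0)] with hd0
  have hnodup : (s.toList.foldl pvStepA d0).keys.Nodup := by
    rw [keys_foldl_pvStepA]; decide
  have hvals := PySem.Dict.values_eq_map_keys (s.toList.foldl pvStepA d0) hnodup 0
  show (s.toList.foldl (fun d flg => if d.keys.contains flg then d.modify flg 0 (· + 1) else d) d0).values = _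
  rw [show (fun (d : PySem.Dict Char Int) (flg : Char) =>
      if d.keys.contains flg then d.modify flg 0 (· + 1) else d) = pvStepA from rfl]
  rw [hvals, keys_foldl_pvStepA]
  have hk : d0.keys = ['F','S','R','P','A','U','E','C'] := by decide
  rw [hk]
  have hget : ∀ k ∈ (['F','S','R','P','A','U','E','C'] : List Char),
      (s.toList.foldl pvStepA d0).getD k 0 = (s.toList.count k : Int) := by
    intro k hkmem
    rw [getD_foldl_pvStepA s.toList d0 k (by rw [hk]; exact hkmem)]
    have : d0.getD k 0 = 0 := by fin_cases hkmem <;> decide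
    rw [this, zero_add]
  have hstr : ("FSRPAUEC" : String).toList = (['F','S','R','P','A','U','E','C'] : List Char) := by decide
  rw [hstr]
  refine List.map_congr_left ?_
  intro k hkmem
  rw [hget k hkmem, PySem.Str.count_eq]
  show _ = ((PySem.Chars.count s.toList (String.ofList [k]).toList : Nat) : Int)
  rw [show (String.ofList [k]).toList = [k] by simp, count_single]
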